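-- pv_equiv track=rewrite | github.com/SassBlanket98/DMARC-Checker | dmarc_lookup.py | analyze_mx_records
-- ===== SOURCE A (Python) =====
-- def analyze_mx_records(mx_records):
--     """
--     Analyze MX records to identify email providers.
--
--     Args:
--         mx_records (list): List of MX records.
--
--     Returns:
--         list: List of identified email providers.
--     """
--     providers = []
--     if not isinstance(mx_records, list): # Add check if mx_records is a list
--         return providers
--
--     for record in mx_records:
--         if not isinstance(record, str): # Ensure record is a string
--             continue
--         record_lower = record.lower()
--
--         if 'google' in record_lower or 'gmail' in record_lower:
--             providers.append("Google Workspace / Gmail")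
--         elif 'microsoft' in record_lower or 'outlook' in record_lower:
--             providers.append("Microsoft 365 / Exchange Online")
--         elif 'amazonses' in record_lower or 'aws' in record_lower:
--             providers.append("Amazon SES")
--         elif 'zoho' in record_lower:
--             providers.append("Zoho Mail")
--         elif 'protonmail' in record_lower:
--             providers.append("ProtonMail")
--         elif 'mailchimp' in record_lower:
--             providers.append("Mailchimp")
--         elif 'sendgrid' in record_lower:
--             providers.append("SendGrid")
--
--     # Remove duplicates and return
--     return list(set(providers))
-- ===== SOURCE B (Python) =====
-- PROVIDERS = [
--     ("Google Workspace / Gmail", ["google", "gmail"]),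
--     ("Microsoft 365 / Exchange Online", ["microsoft", "outlook"]),
--     ("Amazon SES", ["amazonses", "aws"]),
--     ("Zoho Mail", ["zoho"]),
--     ("ProtonMail", ["protonmail"]),
--     ("Mailchimp", ["mailchimp"]),
--     ("SendGrid", ["sendgrid"]),
-- ]
--
--
-- def analyze_mx_records(mx_records):
--     """Provider-major sweep: for each provider in priority order, pull the
--     records it claims out of the remaining pool; a provider is reported iff
--     it claims at least one record.  Returns the providers sorted (the set is
--     order-free)."""
--     if not isinstance(mx_records, list):
--         return []
--     remaining = [r.lower() for r in mx_records if isinstance(r, str)]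
--     found = []
--     for label, keywords in PROVIDERS:
--         claimed = [t for t in remaining if any(k in t for k in keywords)]
--         if claimed:
--             found.append(label)
--         remaining = [t for t in remaining if not any(k in t for k in keywords)]
--     return sorted(found)
-- ===== Notes on version B (the rewrite author's own statement) =====
-- stated objective: alternative
-- what changed: A classifies record-by-record through an elif chain and dedups with set(); B sweeps provider-by-provider in priority order, each provider claiming the matching records out of a shrinking remaining pool and being reported iff it claims at least one, returning the providers sorted (the result is a set, so order is free).
import Mathlib
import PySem

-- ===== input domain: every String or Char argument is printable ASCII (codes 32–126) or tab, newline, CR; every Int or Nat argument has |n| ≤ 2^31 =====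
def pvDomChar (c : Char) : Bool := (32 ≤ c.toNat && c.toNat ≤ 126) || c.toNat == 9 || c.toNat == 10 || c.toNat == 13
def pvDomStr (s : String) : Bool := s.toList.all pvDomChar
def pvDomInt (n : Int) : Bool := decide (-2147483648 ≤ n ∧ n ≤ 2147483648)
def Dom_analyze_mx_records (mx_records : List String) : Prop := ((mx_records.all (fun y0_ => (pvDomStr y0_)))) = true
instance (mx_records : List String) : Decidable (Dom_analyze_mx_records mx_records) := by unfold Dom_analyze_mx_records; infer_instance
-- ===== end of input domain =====

-- B replaces A's record-major elif classification by a provider-major staged sweep: each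
-- provider in priority order claims the matching records out of the remaining pool
-- (alternative decomposition, same cost). Python's list(set(...)) iteration order is
-- unspecified and the output is compared as a set; both ports fix the canonical sorted
-- order for it (B's Python sorts explicitly).

-- ===== PORT A =====
def analyze_mx_records (mx_records : List String) : List String :=
  let providers : List String := mx_records.foldl (fun providers record =>
    let record_lower := PySem.Str.lower record
    if PySem.Str.isIn "google" record_lower || PySem.Str.isIn "gmail" record_lower then
      providers ++ ["Google Workspace / Gmail"]
    else if PySem.Str.isIn "microsoft" record_lower || PySem.Str.isIn "outlook" record_lower then
      providers ++ ["Microsoft 365 / Exchange Online"]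
    else if PySem.Str.isIn "amazonses" record_lower || PySem.Str.isIn "aws" record_lower then
      providers ++ ["Amazon SES"]
    else if PySem.Str.isIn "zoho" record_lower then
      providers ++ ["Zoho Mail"]
    else if PySem.Str.isIn "protonmail" record_lower then
      providers ++ ["ProtonMail"]
    else if PySem.Str.isIn "mailchimp" record_lower then
      providers ++ ["Mailchimp"]
    else if PySem.Str.isIn "sendgrid" record_lower then
      providers ++ ["SendGrid"]
    else providers) []
  -- list(set(providers)): unspecified iteration order, compared as a set; canonical sorted order
  PySem.List.sorted (PySem.Set.ofList providers) (fun x => x) false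

-- ===== PORT B =====
def pvProviders : List (String × List String) :=
  [("Google Workspace / Gmail", ["google", "gmail"]),
   ("Microsoft 365 / Exchange Online", ["microsoft", "outlook"]),
   ("Amazon SES", ["amazonses", "aws"]),
   ("Zoho Mail", ["zoho"]),
   ("ProtonMail", ["protonmail"]),
   ("Mailchimp", ["mailchimp"]),
   ("SendGrid", ["sendgrid"])]

-- the for-loop over PROVIDERS with state (found, remaining), as structural recursion
-- the for-loop over PROVIDERS with state (found, remaining), as structural recursion
def pvSweep : List (String × List String) → List String → List String → List String
  | [], found, _ => found
  | (label, keywords) :: rest, found, remaining =>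
      pvSweep rest
        (if (remaining.filter (fun t => keywords.any (fun k => PySem.Str.isIn k t))).isEmpty then
          found else found ++ [label])
        (remaining.filter (fun t => !(keywords.any (fun k => PySem.Str.isIn k t))))

def analyze_mx_records_alt (mx_records : List String) : List String :=
  PySem.List.sorted (pvSweep pvProviders [] (mx_records.map PySem.Str.lower)) (fun x => x) false

-- ===== PRECONDITION & SPEC =====
def Spec_analyze_mx_records (mx_records : List String) (out : List String) : Prop := out = analyze_mx_records_alt mx_records
instance (mx_records : List String) (out : List String) : Decidable (Spec_analyze_mx_records mx_records out) := by unfold Spec_analyze_mx_records; infer_instance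

-- ===== CLAIM (what is proved, stated in full; the proofs are below) =====
def Claim_equal_analyze_mx_records : Prop := ∀ (mx_records : List String), Dom_analyze_mx_records mx_records → Spec_analyze_mx_records mx_records (analyze_mx_records mx_records)

-- ===== LEMMAS AND PROOFS =====

-- first matching provider group for a (lowered) record, in table priority order
def pvClassify (t : List (String × List String)) (s : String) : Option String :=
  (t.find? (fun e => e.2.any (fun kw => PySem.Str.isIn kw s))).map (fun e => e.1)

theorem pv_find?_cons {α : Type} (p : α → Bool) (a : α) (l : List α) :
    List.find? p (a :: l) = if p a then some a else List.find? p l := by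
  by_cases h : p a <;> simp [h]

-- per-record: A's elif chain appends exactly the label pvClassify selects
theorem pv_step_eq (acc : List String) (record : String) :
    (let record_lower := PySem.Str.lower record
     if PySem.Str.isIn "google" record_lower || PySem.Str.isIn "gmail" record_lower then
       acc ++ ["Google Workspace / Gmail"]
     else if PySem.Str.isIn "microsoft" record_lower || PySem.Str.isIn "outlook" record_lower then
       acc ++ ["Microsoft 365 / Exchange Online"]
     else if PySem.Str.isIn "amazonses" record_lower || PySem.Str.isIn "aws" record_lower then
       acc ++ ["Amazon SES"]
     else if PySem.Str.isIn "zoho" record_lower then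
       acc ++ ["Zoho Mail"]
     else if PySem.Str.isIn "protonmail" record_lower then
       acc ++ ["ProtonMail"]
     else if PySem.Str.isIn "mailchimp" record_lower then
       acc ++ ["Mailchimp"]
     else if PySem.Str.isIn "sendgrid" record_lower then
       acc ++ ["SendGrid"]
     else acc) = acc ++ (pvClassify pvProviders (PySem.Str.lower record)).toList := by
  simp only [pvClassify, pvProviders, pv_find?_cons, List.any_cons, List.any_nil,
    Bool.or_false, apply_ite (Option.map (fun e : String × List String => e.1)),
    Option.map_some, Option.map_none, List.find?_nil]
  split_ifs <;> simp

theorem pv_foldl_eq (mx_records : List String) (acc : List String) :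
    mx_records.foldl (fun providers record =>
      let record_lower := PySem.Str.lower record
      if PySem.Str.isIn "google" record_lower || PySem.Str.isIn "gmail" record_lower then
        providers ++ ["Google Workspace / Gmail"]
      else if PySem.Str.isIn "microsoft" record_lower || PySem.Str.isIn "outlook" record_lower then
        providers ++ ["Microsoft 365 / Exchange Online"]
      else if PySem.Str.isIn "amazonses" record_lower || PySem.Str.isIn "aws" record_lower then
        providers ++ ["Amazon SES"]
      else if PySem.Str.isIn "zoho" record_lower then
        providers ++ ["Zoho Mail"]
      else if PySem.Str.isIn "protonmail" record_lower then
        providers ++ ["ProtonMail"]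
      else if PySem.Str.isIn "mailchimp" record_lower then
        providers ++ ["Mailchimp"]
      else if PySem.Str.isIn "sendgrid" record_lower then
        providers ++ ["SendGrid"]
      else providers) acc
    = acc ++ mx_records.filterMap (fun r => pvClassify pvProviders (PySem.Str.lower r)) := by
  induction mx_records generalizing acc with
  | nil => simp
  | cons r rs ih =>
    rw [List.foldl_cons, pv_step_eq, ih, List.filterMap_cons]
    cases pvClassify pvProviders (PySem.Str.lower r) <;> simp

-- first-match classification distributes over the table's head
theorem pv_classify_cons (label : String) (kws : List String)
    (rest : List (String × List String)) (s : String) :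
    pvClassify ((label, kws) :: rest) s
      = if kws.any (fun kw => PySem.Str.isIn kw s) then some label else pvClassify rest s := by
  rw [pvClassify, pv_find?_cons]
  split_ifs with h1
  · rfl
  · rfl

-- B's sweep collects exactly found ++ the labels pvClassify assigns to some remaining record
theorem pv_sweep_mem (t : List (String × List String)) (found rem : List String) (l : String) :
    l ∈ pvSweep t found rem ↔ l ∈ found ∨ ∃ s ∈ rem, pvClassify t s = some l := by
  induction t generalizing found rem with
  | nil => simp [pvSweep, pvClassify]
  | cons e rest ih =>
    obtain ⟨label, keywords⟩ := e
    rw [pvSweep, ih]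
    simp only [pv_classify_cons]
    by_cases hx : (rem.filter (fun t => keywords.any fun k => PySem.Str.isIn k t)).isEmpty = true
    · have hall : ∀ s ∈ rem, (keywords.any fun k => PySem.Str.isIn k s) = false := by
        intro s hs
        rw [List.isEmpty_iff, List.filter_eq_nil_iff] at hx
        have := hx s hs
        rwa [Bool.not_eq_true] at this
      have hrem : rem.filter (fun t => !(keywords.any fun k => PySem.Str.isIn k t)) = rem :=
        List.filter_eq_self.mpr (fun s hs => by rw [hall s hs]; rfl)
      rw [if_pos hx, hrem]
      refine or_congr Iff.rfl (exists_congr fun s => and_congr_right fun hs => ?_)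
      rw [hall s hs]
      simp
    · have hnil : rem.filter (fun t => keywords.any fun k => PySem.Str.isIn k t) ≠ [] := by
        intro h; exact hx (by rw [h]; rfl)
      obtain ⟨s₀, hmem⟩ := List.exists_mem_of_ne_nil _ hnil
      obtain ⟨hs₀, hm₀⟩ := List.mem_filter.mp hmem
      rw [if_neg hx]
      constructor
      · rintro (h | ⟨s, hsf, hc⟩)
        · rcases List.mem_append.mp h with h | h
          · exact Or.inl h
          · rw [List.mem_singleton] at h
            subst h
            exact Or.inr ⟨s₀, hs₀, by rw [hm₀]; simp⟩
        · obtain ⟨hs, hnp⟩ := List.mem_filter.mp hsf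
          rw [Bool.not_eq_eq_eq_not, Bool.not_true] at hnp
          exact Or.inr ⟨s, hs, by rw [hnp]; simpa using hc⟩
      · rintro (h | ⟨s, hs, hc⟩)
        · exact Or.inl (List.mem_append.mpr (Or.inl h))
        · by_cases hm : (keywords.any fun k => PySem.Str.isIn k s) = true
          · rw [hm] at hc
            simp only [if_true] at hc
            injection hc with hc
            exact Or.inl (List.mem_append.mpr (Or.inr (by simp [hc])))
          · rw [Bool.not_eq_true] at hm
            refine Or.inr ⟨s, List.mem_filter.mpr ⟨hs, by rw [hm]; rfl⟩, ?_⟩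
            rw [hm] at hc
            simpa using hc

-- B's sweep output is found ++ (a sublist of the table's labels)
theorem pv_sweep_sublist (t : List (String × List String)) (found rem : List String) :
    ∃ sub, pvSweep t found rem = found ++ sub ∧ sub.Sublist (t.map Prod.fst) := by
  induction t generalizing found rem with
  | nil => exact ⟨[], by simp [pvSweep], by simp⟩
  | cons e rest ih =>
    obtain ⟨label, keywords⟩ := e
    rw [pvSweep]
    by_cases h : (rem.filter (fun t => keywords.any fun k => PySem.Str.isIn k t)).isEmpty = true
    · obtain ⟨sub, h1, h2⟩ := ih found
        (rem.filter (fun t => !(keywords.any fun k => PySem.Str.isIn k t)))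
      rw [if_pos h]
      exact ⟨sub, h1, by simpa using h2.cons _⟩
    · obtain ⟨sub, h1, h2⟩ := ih (found ++ [label])
        (rem.filter (fun t => !(keywords.any fun k => PySem.Str.isIn k t)))
      rw [if_neg h]
      exact ⟨label :: sub, by rw [h1]; simp, by simpa using List.Sublist.cons₂ label h2⟩

theorem pv_sweep_nodup (rem : List String) : (pvSweep pvProviders [] rem).Nodup := by
  obtain ⟨sub, h1, h2⟩ := pv_sweep_sublist pvProviders [] rem
  rw [h1, List.nil_append]
  exact h2.nodup (by decide)

theorem pv_perm (rem : List String) :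
    (PySem.Set.ofList (rem.filterMap (fun r => pvClassify pvProviders r))).Perm
      (pvSweep pvProviders [] rem) := by
  rw [List.perm_ext_iff_of_nodup (PySem.Set.nodup_ofList _) (pv_sweep_nodup rem)]
  intro l
  rw [PySem.Set.mem_ofList, List.mem_filterMap, pv_sweep_mem]
  simp

-- ===== VERDICT (by name: the statement is the Claim_ definition above) =====
theorem analyze_mx_records_spec : Claim_equal_analyze_mx_records := by
  intro mx_records _
  unfold Spec_analyze_mx_records analyze_mx_records analyze_mx_records_alt
  rw [pv_foldl_eq, List.nil_append]
  have h : mx_records.filterMap (fun r => pvClassify pvProviders (PySem.Str.lower r))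
      = (mx_records.map PySem.Str.lower).filterMap (fun r => pvClassify pvProviders r) := by
    rw [List.filterMap_map]; rfl
  rw [h]
  exact PySem.List.sorted_eq_sorted_of_perm _ _ _ (fun a b hab => hab)
    (pv_perm (mx_records.map PySem.Str.lower))
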